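-- pv_equiv track=rewrite | github.com/Mahesh7780/DSA-leetcode | Day 26/segment-of-ones.py | checkOnesSegment
-- ===== SOURCE A (Python) =====
-- def checkOnesSegment(s: str) -> bool:
--     a = False
--     for c in s:
--         if c == '0':
--             a = True
--         elif a:
--             return False
--
--     return True
-- ===== SOURCE B (Python) =====
-- def checkOnesSegment(s: str) -> bool:
--     return '0' not in s.rstrip('0')
-- ===== Notes on version B (the rewrite author's own statement) =====
-- stated objective: simpler
-- what changed: Replaces the left-to-right flag-carrying scan with early return by stripping the trailing run of zero characters with str.rstrip and asserting no zero character remains in what is left (A accepts exactly the strings consisting of non-zeros followed by zeros).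
import Mathlib
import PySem

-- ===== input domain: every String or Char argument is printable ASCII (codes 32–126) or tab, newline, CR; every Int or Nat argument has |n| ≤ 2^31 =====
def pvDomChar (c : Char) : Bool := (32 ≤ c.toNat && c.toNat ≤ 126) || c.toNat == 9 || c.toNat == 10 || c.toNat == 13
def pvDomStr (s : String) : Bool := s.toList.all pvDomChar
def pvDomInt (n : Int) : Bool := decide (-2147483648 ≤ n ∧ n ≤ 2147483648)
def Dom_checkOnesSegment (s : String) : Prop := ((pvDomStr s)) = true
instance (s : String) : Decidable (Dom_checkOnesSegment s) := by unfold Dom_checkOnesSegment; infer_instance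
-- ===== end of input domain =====

-- B strips the trailing run of '0' characters and asserts no '0' remains, instead of
-- A's left-to-right flag-carrying scan with an early return (objective: simpler).

-- ===== PORT A =====
-- the for-loop with flag `a` and early `return False`
def checkOnesSegmentGo : List Char → Bool → Bool
  | [], _ => true
  | c :: cs, a =>
      if c = '0' then checkOnesSegmentGo cs true
      else if a then false
      else checkOnesSegmentGo cs a

def checkOnesSegment (s : String) : Bool := checkOnesSegmentGo s.toList false

-- ===== PORT B =====
-- s.rstrip('0') ported by hand (PySem has no per-char rstrip) as reverse / dropWhile / reverse —
-- exact: Python's rstrip('0') removes exactly the maximal trailing run of '0'.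
-- `'0' not in t` is ported as `!(t.contains '0')` — exact for a one-character needle,
-- where substring membership coincides with element membership.
def checkOnesSegment_alt (s : String) : Bool :=
  let t := ((s.toList.reverse.dropWhile (fun c => c == '0')).reverse)
  !(t.contains '0')

-- ===== PRECONDITION & SPEC =====
def Spec_checkOnesSegment (s : String) (out : Bool) : Prop := out = checkOnesSegment_alt s
instance (s : String) (out : Bool) : Decidable (Spec_checkOnesSegment s out) := by unfold Spec_checkOnesSegment; infer_instance

-- ===== CLAIM (what is proved, stated in full; the proofs are below) =====
def Claim_equal_checkOnesSegment : Prop := ∀ (s : String), Dom_checkOnesSegment s → Spec_checkOnesSegment s (checkOnesSegment s)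

-- ===== LEMMAS AND PROOFS =====

-- once the flag is set, A accepts iff the rest is all '0'
theorem goA_true (l : List Char) :
    checkOnesSegmentGo l true = l.all (fun c => c == '0') := by
  induction l with
  | nil => rfl
  | cons c cs ih =>
      by_cases h : c = '0' <;> simp [checkOnesSegmentGo, h, ih]

-- A with the flag down: skip non-'0's, then demand all '0'
theorem goA_false (l : List Char) :
    checkOnesSegmentGo l false =
      (l.dropWhile (fun c => !(c == '0'))).all (fun c => c == '0') := by
  induction l with
  | nil => rfl
  | cons c cs ih =>
      by_cases h : c = '0'
      · have hb : (c == '0') = true := by simp [h]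
        simp [checkOnesSegmentGo, h, goA_true]
      · have hb : (c == '0') = false := by simp [h]
        simp [checkOnesSegmentGo, h, ih]

-- "no '0' before the trailing-zero strip point", stated on the un-reversed side
theorem bSide_append (m : List Char) (c : Char) :
    (!(((m ++ [c]).dropWhile (fun c => c == '0')).contains '0')) =
      (if c = '0' then m.all (fun c => c == '0') else !((m.dropWhile (fun c => c == '0')).contains '0')) := by
  induction m with
  | nil =>
      by_cases h : c = '0'
      · simp [h]
      · simp [h, Ne.symm h]
  | cons d m ih =>
      by_cases hd : d = '0'
      · have hdb : (d == '0') = true := by simp [hd]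
        by_cases h : c = '0' <;>
          simp only [List.cons_append, List.dropWhile_cons, hdb] <;>
          simp [h, hd] <;> simpa [h] using ih
      · have hdb : (d == '0') = false := by simp [hd]
        by_cases h : c = '0'
        · simp [hdb, h, Ne.symm hd]
        · simp [hdb, h, Ne.symm hd, Ne.symm h]

-- the two characterisations agree
theorem key (l : List Char) :
    (l.dropWhile (fun c => !(c == '0'))).all (fun c => c == '0') =
      (!((l.reverse.dropWhile (fun c => c == '0')).contains '0')) := by
  induction l with
  | nil => rfl
  | cons c cs ih =>
      by_cases h : c = '0'
      · have hb : (c == '0') = true := by simp [h]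
        rw [List.reverse_cons, bSide_append, if_pos h]
        simp [hb]
      · have hb : (c == '0') = false := by simp [h]
        rw [List.reverse_cons, bSide_append, if_neg h]
        simp [hb, ih]

-- ===== VERDICT (by name: the statement is the Claim_ definition above) =====
theorem checkOnesSegment_spec : Claim_equal_checkOnesSegment := by
  intro s _
  unfold Spec_checkOnesSegment checkOnesSegment checkOnesSegment_alt
  rw [goA_false, key]
  simp
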